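-- pv_equiv track=rewrite | github.com/LucasKronstad/Exercises | december14.py | has_equal_ends
-- ===== SOURCE A (Python) =====
-- def has_equal_ends(x):
--     y = -1
--     for i in (x):
--         y += 1
--     if x[0] == x[y]:
--         return True
--     else:
--         return False
-- ===== SOURCE B (Python) =====
-- def has_equal_ends(x):
--     return x[0] == x[-1]
-- ===== Notes on version B (the rewrite author's own statement) =====
-- stated objective: idiomatic
-- what changed: Dropped the counting loop that derives the last index and compares the first element directly with the last via Python's negative indexing.
import Mathlib
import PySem

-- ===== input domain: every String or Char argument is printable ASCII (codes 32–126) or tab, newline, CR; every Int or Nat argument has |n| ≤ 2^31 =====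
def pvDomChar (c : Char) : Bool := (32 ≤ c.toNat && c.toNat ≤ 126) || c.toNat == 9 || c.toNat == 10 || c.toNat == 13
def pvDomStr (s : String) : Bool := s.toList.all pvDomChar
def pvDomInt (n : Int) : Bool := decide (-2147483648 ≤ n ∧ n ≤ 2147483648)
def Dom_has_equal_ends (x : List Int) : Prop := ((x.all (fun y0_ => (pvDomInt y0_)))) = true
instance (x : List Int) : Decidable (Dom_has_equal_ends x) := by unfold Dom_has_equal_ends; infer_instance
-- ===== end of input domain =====

-- B replaces A's element-counting loop by a direct first-vs-last comparison using negative indexing (idiomatic).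
-- Both A and B raise IndexError on the empty list, excluded by Pre_.

-- ===== PORT A =====
-- A: counts elements with a loop to derive the last index, then compares the first and that element.
def has_equal_ends (x : List Int) : Bool :=
  let y := x.foldl (fun y _ => y + 1) (-1 : Int)
  match PySem.List.pyGet? x 0, PySem.List.pyGet? x y with
  | some a, some b => a == b
  | _, _ => false   -- IndexError in Python; excluded by Pre_

-- ===== PORT B =====
def has_equal_ends_alt (x : List Int) : Bool :=
  ((PySem.List.pyGet? x 0).bind fun a =>
    (PySem.List.pyGet? x (-1)).map fun b => a == b).getD false
  -- none (IndexError in Python) only on [], excluded by Pre_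

-- ===== PRECONDITION & SPEC =====
-- Pre_ excludes only the empty list, on which both Pythons raise IndexError when indexing the first element.
def Pre_has_equal_ends (x : List Int) : Prop := x ≠ []
instance (x : List Int) : Decidable (Pre_has_equal_ends x) := by unfold Pre_has_equal_ends; infer_instance
def pvWitness_has_equal_ends : List Int := [3, 1, 3]

def Spec_has_equal_ends (x : List Int) (out : Bool) : Prop := out = has_equal_ends_alt x
instance (x : List Int) (out : Bool) : Decidable (Spec_has_equal_ends x out) := by unfold Spec_has_equal_ends; infer_instance

-- ===== CLAIM (what is proved, stated in full; the proofs are below) =====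
def Claim_equal_has_equal_ends : Prop := ∀ (x : List Int), Dom_has_equal_ends x → Pre_has_equal_ends x → Spec_has_equal_ends x (has_equal_ends x)

-- ===== LEMMAS AND PROOFS =====
-- A's loop computes (length x) - 1.
theorem pv_foldl_count (x : List Int) (y : Int) :
    x.foldl (fun y _ => y + 1) y = y + x.length := by
  induction x generalizing y with
  | nil => simp
  | cons a t ih => simp [List.foldl, ih]; ring

theorem pv_pyGet_last (x : List Int) (hx : x ≠ []) :
    PySem.List.pyGet? x ((-1 : Int) + x.length) = PySem.List.pyGet? x (-1) := by
  rw [PySem.List.pyGet?_neg_one]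
  have hlen : 0 < x.length := List.length_pos_iff.mpr hx
  have : ((-1 : Int) + x.length) = ((x.length - 1 : Nat) : Int) := by omega
  rw [this, PySem.List.pyGet?_natCast, List.getLast?_eq_getElem?]

-- ===== VERDICT (by name: the statement is the Claim_ definition above) =====
theorem has_equal_ends_spec : Claim_equal_has_equal_ends := by
  intro x _ hpre
  unfold Spec_has_equal_ends has_equal_ends has_equal_ends_alt
  simp only [pv_foldl_count]
  rw [pv_pyGet_last x hpre]
  cases PySem.List.pyGet? x 0 <;> cases PySem.List.pyGet? x (-1) <;> rfl
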